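-- pv_equiv track=rewrite | github.com/neacisu/internal_CMDB | src/internalcmdb/cognitive/drift_detector.py | _classify_drift
-- ===== SOURCE A (Python) =====
-- _CRITICAL_FIELDS: frozenset[str] = frozenset({
--     "sshd_config",
--     "firewall_rules",
--     "iptables",
--     "nftables",
--     "tls_version",
--     "tls_cipher",
--     "certificate_fingerprint",
--     "certificate_expiry",
--     "authorized_keys",
--     "root_login",
--     "password_auth",
--     "port",
--     "listen_address",
--     "permit_root_login",
--     "allowed_users",
--     "security_group",
--     "selinux_mode",
--     "apparmor_profile",
-- })
--
-- _INTENTIONAL_FIELDS: frozenset[str] = frozenset({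
--     "version",
--     "image",
--     "image_tag",
--     "container_image",
--     "replicas",
--     "resource_limits",
--     "resource_requests",
--     "environment",
--     "labels",
--     "annotations",
--     "description",
--     "metadata",
--     "tags",
--     "scaling_policy",
-- })
--
-- def _classify_drift(changed_fields: list[str]) -> str:
--     """Classify the overall drift severity based on changed field names.
--
--     Priority: critical > accidental > intentional.
--     """
--     has_critical = any(f in _CRITICAL_FIELDS for f in changed_fields)
--     has_intentional = any(f in _INTENTIONAL_FIELDS for f in changed_fields)
--
--     if has_critical:
--         return "critical"
--
--     if has_intentional and all(
--         f in _INTENTIONAL_FIELDS for f in changed_fields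
--     ):
--         return "intentional"
--
--     return "accidental"
-- ===== SOURCE B (Python) =====
-- _CRITICAL_FIELDS: frozenset[str] = frozenset({
--     "sshd_config", "firewall_rules", "iptables", "nftables", "tls_version",
--     "tls_cipher", "certificate_fingerprint", "certificate_expiry",
--     "authorized_keys", "root_login", "password_auth", "port", "listen_address",
--     "permit_root_login", "allowed_users", "security_group", "selinux_mode",
--     "apparmor_profile",
-- })
--
-- _INTENTIONAL_FIELDS: frozenset[str] = frozenset({
--     "version", "image", "image_tag", "container_image", "replicas",
--     "resource_limits", "resource_requests", "environment", "labels",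
--     "annotations", "description", "metadata", "tags", "scaling_policy",
-- })
--
-- # Numeric severity per field: critical=2, unknown (accidental)=1, intentional=0.
-- def _rank(f: str) -> int:
--     if f in _CRITICAL_FIELDS:
--         return 2
--     if f in _INTENTIONAL_FIELDS:
--         return 0
--     return 1
--
-- _VERDICT = {2: "critical", 1: "accidental", 0: "intentional"}
--
-- def _classify_drift(changed_fields: list[str]) -> str:
--     # The drift severity is the maximum field severity; an empty change set
--     # has severity "accidental" like any set with no critical/intentional field.
--     if not changed_fields:
--         return "accidental"
--     return _VERDICT[max(_rank(f) for f in changed_fields)]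
-- ===== Notes on version B (the rewrite author's own statement) =====
-- stated objective: alternative
-- what changed: Replaces A's boolean any/all membership scans and branch chain with a map-reduce: each field is mapped to a numeric severity rank (critical=2, unknown=1, intentional=0), the list is reduced with max, and the verdict is looked up from the maximal rank; correct because the sets are disjoint and A's priority order coincides with the rank order.
import Mathlib
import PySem

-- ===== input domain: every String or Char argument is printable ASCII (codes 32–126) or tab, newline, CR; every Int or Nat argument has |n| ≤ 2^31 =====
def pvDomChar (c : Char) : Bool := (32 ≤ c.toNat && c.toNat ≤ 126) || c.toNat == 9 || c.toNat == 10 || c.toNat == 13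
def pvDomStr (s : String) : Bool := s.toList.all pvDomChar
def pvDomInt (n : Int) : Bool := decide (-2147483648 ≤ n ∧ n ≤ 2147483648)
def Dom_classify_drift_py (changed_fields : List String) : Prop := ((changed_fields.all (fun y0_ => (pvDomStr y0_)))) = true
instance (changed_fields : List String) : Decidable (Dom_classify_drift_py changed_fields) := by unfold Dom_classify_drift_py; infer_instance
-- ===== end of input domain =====

-- B changes: maps each field to a numeric severity rank (critical=2, unknown=1,
-- intentional=0), reduces with max and looks the verdict up from the maximal
-- rank, instead of A's any/all membership scans and branch chain (alternative).

-- ===== PORT A =====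
def pvCriticalFields : List String :=
  ["sshd_config", "firewall_rules", "iptables", "nftables", "tls_version",
   "tls_cipher", "certificate_fingerprint", "certificate_expiry",
   "authorized_keys", "root_login", "password_auth", "port", "listen_address",
   "permit_root_login", "allowed_users", "security_group", "selinux_mode",
   "apparmor_profile"]

def pvIntentionalFields : List String :=
  ["version", "image", "image_tag", "container_image", "replicas",
   "resource_limits", "resource_requests", "environment", "labels",
   "annotations", "description", "metadata", "tags", "scaling_policy"]

def classify_drift_py (changed_fields : List String) : String :=
  let has_critical := changed_fields.any (fun f => pvCriticalFields.contains f)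
  let has_intentional := changed_fields.any (fun f => pvIntentionalFields.contains f)
  if has_critical then "critical"
  else if has_intentional && changed_fields.all (fun f => pvIntentionalFields.contains f) then
    "intentional"
  else "accidental"

-- ===== PORT B =====
def pvRank (f : String) : Int :=
  if pvCriticalFields.contains f then 2
  else if pvIntentionalFields.contains f then 0
  else 1

-- _VERDICT[m]; the rank is always a key, so the .getD "" default is never used
-- (it only makes the lookup total where Python's dict indexing could raise).
def pvVerdictDict : PySem.Dict Int String :=
  PySem.Dict.ofList [((2 : Int), "critical"), ((1 : Int), "accidental"), ((0 : Int), "intentional")]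

def pvVerdict (m : Int) : String := (PySem.Dict.get? pvVerdictDict m).getD ""

def classify_drift_py_alt (changed_fields : List String) : String :=
  match changed_fields with
  | [] => "accidental"
  | x :: xs => pvVerdict (xs.foldl (fun m f => max m (pvRank f)) (pvRank x))

-- ===== PRECONDITION & SPEC =====
def Spec_classify_drift_py (changed_fields : List String) (out : String) : Prop := out = classify_drift_py_alt changed_fields
instance (changed_fields : List String) (out : String) : Decidable (Spec_classify_drift_py changed_fields out) := by unfold Spec_classify_drift_py; infer_instance

-- ===== CLAIM (what is proved, stated in full; the proofs are below) =====
def Claim_equal_classify_drift_py : Prop := ∀ (changed_fields : List String), Dom_classify_drift_py changed_fields → Spec_classify_drift_py changed_fields (classify_drift_py changed_fields)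

-- ===== LEMMAS AND PROOFS =====
theorem pvRank_bounds (f : String) : 0 ≤ pvRank f ∧ pvRank f ≤ 2 := by
  unfold pvRank; split_ifs <;> omega

theorem pvVerdict_two : pvVerdict 2 = "critical" := by decide
theorem pvVerdict_one : pvVerdict 1 = "accidental" := by decide
theorem pvVerdict_zero : pvVerdict 0 = "intentional" := by decide

theorem pvRank_eq_two (f : String) :
    (pvRank f = 2 ↔ pvCriticalFields.contains f = true) := by
  unfold pvRank; split_ifs with h1 h2 <;>
    simp_all [List.contains_iff_mem]

theorem pvRank_eq_zero (f : String) :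
    (pvRank f = 0 ↔ (pvCriticalFields.contains f = false ∧ pvIntentionalFields.contains f = true)) := by
  unfold pvRank; split_ifs with h1 h2 <;>
    simp_all [List.contains_iff_mem]

theorem pvFold_bounds (xs : List String) (a : Int) (h0 : 0 ≤ a) (h2 : a ≤ 2) :
    0 ≤ xs.foldl (fun m f => max m (pvRank f)) a ∧
    xs.foldl (fun m f => max m (pvRank f)) a ≤ 2 := by
  induction xs generalizing a with
  | nil => exact ⟨h0, h2⟩
  | cons x xs ih =>
    have hb := pvRank_bounds x
    exact ih (max a (pvRank x)) (by omega) (by omega)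

theorem pvFold_eq_two (xs : List String) (a : Int) (h0 : 0 ≤ a) (h2 : a ≤ 2) :
    (xs.foldl (fun m f => max m (pvRank f)) a = 2 ↔
      a = 2 ∨ (xs.any (fun f => pvCriticalFields.contains f)) = true) := by
  induction xs generalizing a with
  | nil => simp
  | cons x xs ih =>
    have hb := pvRank_bounds x
    rw [List.foldl_cons, ih (max a (pvRank x)) (by omega) (by omega)]
    have hx := pvRank_eq_two x
    simp only [List.any_cons, Bool.or_eq_true]
    constructor
    · rintro (hm | h)
      · rcases max_choice a (pvRank x) with h' | h' <;> rw [h'] at hm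
        · exact Or.inl hm
        · exact Or.inr (Or.inl (hx.mp hm))
      · exact Or.inr (Or.inr h)
    · rintro (ha | hc | h)
      · left; omega
      · left; have := hx.mpr hc; omega
      · right; exact h

theorem pvFold_eq_zero (xs : List String) (a : Int) (h0 : 0 ≤ a) :
    (xs.foldl (fun m f => max m (pvRank f)) a = 0 ↔
      a = 0 ∧ ∀ f ∈ xs, pvRank f = 0) := by
  induction xs generalizing a with
  | nil => simp
  | cons x xs ih =>
    have hb := pvRank_bounds x
    rw [List.foldl_cons, ih (max a (pvRank x)) (by omega)]
    constructor
    · rintro ⟨hm, hall⟩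
      have hamax : a = 0 ∧ pvRank x = 0 := by
        rcases max_choice a (pvRank x) with h' | h' <;> rw [h'] at hm <;>
          constructor <;> omega
      refine ⟨hamax.1, ?_⟩
      intro f hf
      rcases List.mem_cons.mp hf with rfl | hf
      · exact hamax.2
      · exact hall f hf
    · rintro ⟨ha, hall⟩
      have hx : pvRank x = 0 := hall x (List.mem_cons_self)
      exact ⟨by omega, fun f hf => hall f (List.mem_cons_of_mem x hf)⟩

theorem classify_drift_py_spec : Claim_equal_classify_drift_py := by
  intro cf _
  unfold Spec_classify_drift_py classify_drift_py classify_drift_py_alt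
  match cf with
  | [] => simp
  | x :: xs =>
    have hbx := pvRank_bounds x
    have hbm := pvFold_bounds xs (pvRank x) hbx.1 hbx.2
    have h2 := pvFold_eq_two xs (pvRank x) hbx.1 hbx.2
    have h0 := pvFold_eq_zero xs (pvRank x) hbx.1
    by_cases hC : ((x :: xs).any (fun f => pvCriticalFields.contains f)) = true
    · have hm2 : xs.foldl (fun m f => max m (pvRank f)) (pvRank x) = 2 := by
        rw [h2]
        rcases Bool.or_eq_true_iff.mp (by simpa only [List.any_cons] using hC) with h | h
        · exact Or.inl ((pvRank_eq_two x).mpr h)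
        · exact Or.inr h
      simp only [hC, if_true, hm2, pvVerdict_two]
    · have hnc : ∀ f ∈ x :: xs, pvCriticalFields.contains f = false := by
        intro f hf
        by_contra h
        exact hC (List.any_eq_true.mpr ⟨f, hf, by simpa using h⟩)
      have hm2' : xs.foldl (fun m f => max m (pvRank f)) (pvRank x) ≠ 2 := by
        intro h
        rcases h2.mp h with h' | h'
        · have := hnc x List.mem_cons_self
          rw [(pvRank_eq_two x).mp h'] at this
          exact absurd this (by norm_num)
        · rcases List.any_eq_true.mp h' with ⟨f, hf, hcf⟩
          have := hnc f (List.mem_cons_of_mem x hf)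
          rw [hcf] at this
          exact absurd this (by norm_num)
      simp only [Bool.not_eq_true] at hC
      simp only [hC, Bool.false_eq_true, if_false]
      by_cases hAll : ((x :: xs).all (fun f => pvIntentionalFields.contains f)) = true
      · have hallP : ∀ f ∈ x :: xs, pvIntentionalFields.contains f = true :=
          List.all_eq_true.mp hAll
        have hI : ((x :: xs).any (fun f => pvIntentionalFields.contains f)) = true :=
          List.any_eq_true.mpr ⟨x, List.mem_cons_self, hallP x List.mem_cons_self⟩
        have hm0 : xs.foldl (fun m f => max m (pvRank f)) (pvRank x) = 0 := by
          rw [h0]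
          refine ⟨(pvRank_eq_zero x).mpr ⟨hnc x List.mem_cons_self, hallP x List.mem_cons_self⟩, ?_⟩
          intro f hf
          exact (pvRank_eq_zero f).mpr
            ⟨hnc f (List.mem_cons_of_mem x hf), hallP f (List.mem_cons_of_mem x hf)⟩
        simp only [hI, hAll, Bool.and_self, if_true, hm0, pvVerdict_zero]
      · have hm0' : xs.foldl (fun m f => max m (pvRank f)) (pvRank x) ≠ 0 := by
          intro h
          rcases h0.mp h with ⟨ha0, hall⟩
          apply hAll
          refine List.all_eq_true.mpr ?_
          intro f hf
          rcases List.mem_cons.mp hf with rfl | hf'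
          · exact ((pvRank_eq_zero f).mp ha0).2
          · exact ((pvRank_eq_zero f).mp (hall f hf')).2
        have hm1 : xs.foldl (fun m f => max m (pvRank f)) (pvRank x) = 1 := by omega
        simp only [Bool.not_eq_true] at hAll
        simp only [hAll, Bool.and_false, Bool.false_eq_true, if_false, hm1, pvVerdict_one]
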